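-- pv_equiv track=rewrite | github.com/AzamatKomaev/netology-practice | 03/products_in_shop.py | calculate_the_cheapest_shop
-- ===== SOURCE A (Python) =====
-- def calculate_the_cheapest_shop(products, prices):
--     total_priceses = {}
--     for shop_name, prices in prices.items():
--         total_priceses[shop_name] = 0
--         for product in products:
--             total_priceses[shop_name] += prices[product]
--
--     cheapest_shop = min(total_priceses, key=total_priceses.get)
--     cheapest_price = total_priceses[cheapest_shop]
--     return f"Shop {cheapest_shop} is the most cheapest. Price of all products is {cheapest_price}."
-- ===== SOURCE B (Python) =====
-- def calculate_the_cheapest_shop(products, prices):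
--     best_shop = None
--     best_price = None
--     for shop_name, shop_prices in prices.items():
--         total = sum(shop_prices[product] for product in products)
--         if best_price is None or total < best_price:
--             best_shop, best_price = shop_name, total
--     return f"Shop {best_shop} is the most cheapest. Price of all products is {best_price}."
-- ===== Notes on version B (the rewrite author's own statement) =====
-- stated objective: simpler
-- what changed: Drops the totals dict entirely: one online pass over prices.items() keeps the running cheapest (shop, total), with strict < so ties keep the first shop, replacing A's build-table-then-min(key=dict.get) structure.
import Mathlib
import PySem

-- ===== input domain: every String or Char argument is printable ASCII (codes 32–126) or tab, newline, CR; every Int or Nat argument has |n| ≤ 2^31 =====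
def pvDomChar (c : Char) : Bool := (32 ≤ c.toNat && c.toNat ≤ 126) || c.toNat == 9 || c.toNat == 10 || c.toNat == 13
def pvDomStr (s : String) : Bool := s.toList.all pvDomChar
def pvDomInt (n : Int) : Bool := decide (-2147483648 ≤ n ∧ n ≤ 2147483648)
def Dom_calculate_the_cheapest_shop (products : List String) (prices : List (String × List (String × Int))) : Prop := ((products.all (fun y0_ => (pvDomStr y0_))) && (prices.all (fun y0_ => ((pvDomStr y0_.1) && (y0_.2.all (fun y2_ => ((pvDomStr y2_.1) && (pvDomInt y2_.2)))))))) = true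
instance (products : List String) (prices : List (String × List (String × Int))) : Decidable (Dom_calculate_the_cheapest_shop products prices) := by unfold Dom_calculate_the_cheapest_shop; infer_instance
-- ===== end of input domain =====

-- B replaces A's build-a-totals-dict-then-min(key=dict.get) structure by a single online-minimum
-- pass over the shops (same cost; objective: simpler).


-- ===== PORT A =====
def calculate_the_cheapest_shop (products : List String) (prices : List (String × List (String × Int))) : String :=
  -- total_priceses = {}; for shop_name, prices in prices.items(): ...
  let total_priceses : PySem.Dict String Int :=
    prices.foldl
      (fun d sp =>
        products.foldl
          (fun d product =>
            -- total_priceses[shop_name] += prices[product]  (prices[product] under Pre_; getD 0 is only read on admitted inputs where the key exists)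
            PySem.Dict.modify d sp.1 0
              (fun t => t + (PySem.Dict.get? (PySem.Dict.mk sp.2) product).getD 0))
          (PySem.Dict.insert d sp.1 0))
      PySem.Dict.empty
  -- cheapest_shop = min(total_priceses, key=total_priceses.get)  (ValueError on empty dict: excluded by Pre_)
  match PySem.List.min? total_priceses.keys (fun k => PySem.Dict.getD total_priceses k 0) with
  | some cheapest_shop =>
      "Shop " ++ cheapest_shop ++ " is the most cheapest. Price of all products is "
        ++ PySem.Int.toStr (PySem.Dict.getD total_priceses cheapest_shop 0) ++ "."
  | none => ""  -- unreachable under Pre_ (Python raises ValueError)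

-- ===== PORT B =====
def pvShopTotal (products : List String) (shop_prices : List (String × Int)) : Int :=
  (products.map (fun product => (PySem.Dict.get? (PySem.Dict.mk shop_prices) product).getD 0)).sum

def calculate_the_cheapest_shop_alt (products : List String) (prices : List (String × List (String × Int))) : String :=
  let best : Option (String × Int) :=
    prices.foldl
      (fun acc sp =>
        let total := pvShopTotal products sp.2
        match acc with
        | none => some (sp.1, total)
        | some b => if total < b.2 then some (sp.1, total) else some b)
      none
  match best with
  | some b =>
      "Shop " ++ b.1 ++ " is the most cheapest. Price of all products is "
        ++ PySem.Int.toStr b.2 ++ "."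
  | none => "Shop None is the most cheapest. Price of all products is None."

-- ===== PRECONDITION & SPEC =====
-- Pre_ excludes: empty prices (A's min raises ValueError) and a product missing from some shop's
-- price dict (A raises KeyError); it also excludes duplicate shop keys, which a Python dict cannot
-- represent (prices is a dict), so nothing A returns on is excluded by that clause.
def Pre_calculate_the_cheapest_shop (products : List String) (prices : List (String × List (String × Int))) : Prop :=
  prices ≠ [] ∧ (prices.map (fun sp => sp.1)).Nodup ∧
    ∀ sp ∈ prices, ∀ p ∈ products, p ∈ sp.2.map (fun q => q.1)
instance (products : List String) (prices : List (String × List (String × Int))) : Decidable (Pre_calculate_the_cheapest_shop products prices) := by unfold Pre_calculate_the_cheapest_shop; infer_instance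

def pvWitness_calculate_the_cheapest_shop : List String × (List (String × List (String × Int))) :=
  (["a"], [("S", [("a", 3)]), ("T", [("a", 2)])])

def Spec_calculate_the_cheapest_shop (products : List String) (prices : List (String × List (String × Int))) (out : String) : Prop := out = calculate_the_cheapest_shop_alt products prices
instance (products : List String) (prices : List (String × List (String × Int))) (out : String) : Decidable (Spec_calculate_the_cheapest_shop products prices out) := by unfold Spec_calculate_the_cheapest_shop; infer_instance

-- ===== CLAIM (what is proved, stated in full; the proofs are below) =====
def Claim_equal_calculate_the_cheapest_shop : Prop := ∀ (products : List String) (prices : List (String × List (String × Int))), Dom_calculate_the_cheapest_shop products prices → Pre_calculate_the_cheapest_shop products prices → Spec_calculate_the_cheapest_shop products prices (calculate_the_cheapest_shop products prices)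

-- ===== LEMMAS AND PROOFS =====

-- named step functions for the two minimum folds (proof-only helpers)
def pvStepB (acc : Option (String × Int)) (x : String × Int) : Option (String × Int) :=
  match acc with
  | none => some x
  | some m => if x.2 < m.2 then some x else some m

def pvStepK (g : String → Int) (acc : Option String) (k : String) : Option String :=
  match acc with
  | none => some k
  | some m => if g k < g m then some k else some m

theorem pv_min_fold (l : List (String × Int)) :
    PySem.List.min? l (fun pr => pr.2) = l.foldl pvStepB none := by
  simp only [PySem.List.min?]
  congr 1
  funext a x
  cases a <;> rfl

theorem pv_min_fold_keys (l : List String) (g : String → Int) :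
    PySem.List.min? l g = l.foldl (pvStepK g) none := by
  simp only [PySem.List.min?]
  congr 1
  funext a x
  cases a <;> rfl

-- With no duplicate keys, find? returns the entry itself.
theorem pv_find_eq {α : Type} (l : List (String × α)) (pr : String × α)
    (hnd : (l.map (fun q => q.1)).Nodup) (hm : pr ∈ l) :
    l.find? (fun q => q.1 == pr.1) = some pr := by
  induction l with
  | nil => cases hm
  | cons x t ih =>
    simp only [List.map_cons, List.nodup_cons] at hnd
    rcases List.mem_cons.mp hm with rfl | hm'
    · simp
    · have hx : (x.1 == pr.1) = false := by
        have : pr.1 ∈ t.map (fun q => q.1) := List.mem_map_of_mem hm'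
        simp only [beq_eq_false_iff_ne]; intro h; exact hnd.1 (h ▸ this)
      simp [hx, ih hnd.2 hm']

-- A's inner product loop: repeated modify of a freshly appended key (s, c) adds the sum.
theorem pv_inner (f : String → Int) (ps : List String) :
    ∀ (M : List (String × Int)) (s : String) (c : Int), (∀ pr ∈ M, pr.1 ≠ s) →
    ps.foldl (fun d p => PySem.Dict.modify d s 0 (fun t => t + f p)) (PySem.Dict.mk (M ++ [(s, c)]))
      = PySem.Dict.mk (M ++ [(s, c + (ps.map f).sum)]) := by
  induction ps with
  | nil => intro M s c _; simp
  | cons p rest ih =>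
    intro M s c hfr
    have hM : ∀ pr ∈ M, (pr.1 == s) = false := by
      intro pr h; simpa using hfr pr h
    have hfind : (M ++ [(s, c)]).find? (fun q => q.1 == s) = some (s, c) := by
      rw [List.find?_append]
      have : M.find? (fun q => q.1 == s) = none := by
        rw [List.find?_eq_none]; intro pr h; simp [hM pr h]
      simp [this]
    have hcont : (PySem.Dict.mk (M ++ [(s, c)])).contains s = true := by
      simp [PySem.Dict.contains, List.any_append]
    have hstep : PySem.Dict.modify (PySem.Dict.mk (M ++ [(s, c)])) s 0 (fun t => t + f p)
        = PySem.Dict.mk (M ++ [(s, c + f p)]) := by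
      simp only [PySem.Dict.modify, PySem.Dict.getD, PySem.Dict.get?, hfind, Option.map_some,
        Option.getD_some, PySem.Dict.insert, hcont, if_pos]
      congr 1
      rw [List.map_append]
      congr 1
      · rw [List.map_congr_left (g := id) (fun pr h => by simp [hM pr h]), List.map_id]
      · simp
    rw [List.foldl_cons, hstep, ih M s (c + f p) hfr]
    simp [add_assoc]

-- A's outer shop loop builds exactly the list of (shop, total) pairs.
theorem pv_outer (products : List String) (prices : List (String × List (String × Int))) :
    ∀ (M : List (String × Int)),
    List.Pairwise (fun a b => a.1 ≠ b.1) prices →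
    (∀ sp ∈ prices, ∀ pr ∈ M, pr.1 ≠ sp.1) →
    prices.foldl
      (fun d sp =>
        products.foldl
          (fun d product =>
            PySem.Dict.modify d sp.1 0
              (fun t => t + (PySem.Dict.get? (PySem.Dict.mk sp.2) product).getD 0))
          (PySem.Dict.insert d sp.1 0))
      (PySem.Dict.mk M)
      = PySem.Dict.mk (M ++ prices.map (fun sp => (sp.1, pvShopTotal products sp.2))) := by
  induction prices with
  | nil => intro M _ _; simp
  | cons sp rest ih =>
    intro M hpw hfr
    have hfr1 : ∀ pr ∈ M, pr.1 ≠ sp.1 := fun pr h => hfr sp (by simp) pr h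
    have hcont : (PySem.Dict.mk M).contains sp.1 = false := by
      simp only [PySem.Dict.contains, List.any_eq_false]
      intro pr h; simpa using hfr1 pr h
    have hins : PySem.Dict.insert (PySem.Dict.mk M) sp.1 0 = PySem.Dict.mk (M ++ [(sp.1, 0)]) := by
      simp [PySem.Dict.insert, hcont]
    rw [List.foldl_cons, hins,
      pv_inner (fun product => (PySem.Dict.get? (PySem.Dict.mk sp.2) product).getD 0)
        products M sp.1 0 hfr1]
    have hfr' : ∀ sp' ∈ rest, ∀ pr ∈ M ++ [(sp.1, 0 + (products.map (fun product => (PySem.Dict.get? (PySem.Dict.mk sp.2) product).getD 0)).sum)], pr.1 ≠ sp'.1 := by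
      intro sp' h' pr hpr
      rcases List.mem_append.mp hpr with h | h
      · exact hfr sp' (by simp [h']) pr h
      · simp only [List.mem_singleton] at h; subst h
        exact (List.pairwise_cons.mp hpw).1 sp' h'
    rw [ih (M ++ [(sp.1, 0 + _)]) (List.pairwise_cons.mp hpw).2 hfr']
    simp [pvShopTotal]

-- min over the keys with a lookup key-function is the pair-minimum fold projected to the key.
theorem pv_min_map (g : String → Int) (l : List (String × Int))
    (h : ∀ pr ∈ l, g pr.1 = pr.2) :
    PySem.List.min? (l.map (fun pr => pr.1)) g
      = Option.map (fun pr => pr.1) (PySem.List.min? l (fun pr => pr.2)) := by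
  have aux : ∀ (l : List (String × Int)) (acc : Option (String × Int)),
      (∀ pr ∈ l, g pr.1 = pr.2) → (∀ pr, acc = some pr → g pr.1 = pr.2) →
      (l.map (fun pr => pr.1)).foldl (pvStepK g) (acc.map (fun pr => pr.1))
      = Option.map (fun pr => pr.1) (l.foldl pvStepB acc) := by
    intro l
    induction l with
    | nil => intro acc _ _; rfl
    | cons x t ih =>
      intro acc hl hacc
      have hx : g x.1 = x.2 := hl x (by simp)
      have hl' : ∀ pr ∈ t, g pr.1 = pr.2 := fun pr h' => hl pr (by simp [h'])
      cases acc with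
      | none =>
        simpa [pvStepK, pvStepB] using ih (some x) hl' (by rintro pr ⟨rfl⟩; exact hx)
      | some m =>
        have hm : g m.1 = m.2 := hacc m rfl
        simp only [List.map_cons, List.foldl_cons, Option.map_some, pvStepK, pvStepB, hx, hm]
        by_cases hlt : x.2 < m.2
        · simp only [if_pos hlt]
          exact ih (some x) hl' (by rintro pr ⟨rfl⟩; exact hx)
        · simp only [if_neg hlt]
          exact ih (some m) hl' (by rintro pr ⟨rfl⟩; exact hm)
  rw [pv_min_fold, pv_min_fold_keys]
  simpa only [Option.map_none] using
    aux l none h (by intro pr h'; cases h')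

-- ===== VERDICT (by name: the statement is the Claim_ definition above) =====
theorem calculate_the_cheapest_shop_spec : Claim_equal_calculate_the_cheapest_shop := by
  intro products prices _hdom hpre
  obtain ⟨hne, hnd, _hmem⟩ := hpre
  unfold Spec_calculate_the_cheapest_shop
  simp only [calculate_the_cheapest_shop, calculate_the_cheapest_shop_alt]
  have hpw : List.Pairwise (fun a b : String × List (String × Int) => a.1 ≠ b.1) prices := by
    simpa [List.Nodup, List.pairwise_map] using hnd
  set L : List (String × Int) := prices.map (fun sp => (sp.1, pvShopTotal products sp.2)) with hL
  have htot : prices.foldl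
      (fun d sp =>
        products.foldl
          (fun d product =>
            PySem.Dict.modify d sp.1 0
              (fun t => t + (PySem.Dict.get? (PySem.Dict.mk sp.2) product).getD 0))
          (PySem.Dict.insert d sp.1 0))
      PySem.Dict.empty = PySem.Dict.mk L := by
    have h := pv_outer products prices [] hpw (by simp)
    simpa only [List.nil_append] using h
  have hndL : (L.map (fun pr => pr.1)).Nodup := by
    simpa [hL, List.map_map, Function.comp] using hnd
  have hg : ∀ pr ∈ L, PySem.Dict.getD (PySem.Dict.mk L) pr.1 0 = pr.2 := by
    intro pr hm
    simp [PySem.Dict.getD, PySem.Dict.get?, pv_find_eq L pr hndL hm]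
  have hB : prices.foldl
      (fun acc sp =>
        match acc with
        | none => some (sp.1, pvShopTotal products sp.2)
        | some b => if pvShopTotal products sp.2 < b.2 then some (sp.1, pvShopTotal products sp.2) else some b)
      none = PySem.List.min? L (fun pr => pr.2) := by
    rw [pv_min_fold, hL, List.foldl_map]
    congr 1
  rw [htot, hB]
  have hkeys : (PySem.Dict.mk L).keys = L.map (fun pr => pr.1) := rfl
  rw [hkeys, pv_min_map (fun k => PySem.Dict.getD (PySem.Dict.mk L) k 0) L hg]
  have hLne : L ≠ [] := by simpa [hL] using hne
  cases hmin : PySem.List.min? L (fun pr => pr.2) with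
  | none => exact absurd ((PySem.List.min?_eq_none_iff L _).mp hmin) hLne
  | some m =>
    simp only [Option.map_some, hg m (PySem.List.min?_mem hmin)]
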